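-- pv_equiv track=rewrite | github.com/geeksloth/MD5-hint | src/md5hint_v0.8.0.py | bruteForceNumber
-- ===== SOURCE A (Python) =====
-- def bruteForceNumber(string):
-- 	output=[""]
-- 	for c in string:
-- 		tmp = []
-- 		if c.isnumeric():
-- 			for o in output:
-- 				for i in range(0, 10):
-- 					tmp.append(o+str(i))
-- 		else:
-- 			for o in output:
-- 				tmp.append(o+c)
-- 		output = tmp
-- 	return output
-- ===== SOURCE B (Python) =====
-- def bruteForceNumber(string):
--     # Faster counting enumeration: the k numeric positions form a k-digit base-10
--     # counter; output j (for j in range(10**k)) is the string with those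
--     # positions overwritten by the digits of j (leftmost most significant).
--     pos = [i for i, c in enumerate(string) if c.isnumeric()]
--     res = []
--     for j in range(10 ** len(pos)):
--         chars = list(string)
--         n = j
--         for i in reversed(pos):
--             chars[i] = str(n % 10)
--             n //= 10
--         res.append("".join(chars))
--     return res
-- ===== Notes on version B (the rewrite author's own statement) =====
-- stated objective: faster
-- what changed: Replaces A's incremental prefix-growing accumulation (rebuilding the whole output list of partial strings once per character, quadratic in the string length when few digits occur) with a counting enumeration: precompute the k numeric positions, then for each j in range(10**k) write the base-10 digits of j into those positions and join once.
import Mathlib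
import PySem

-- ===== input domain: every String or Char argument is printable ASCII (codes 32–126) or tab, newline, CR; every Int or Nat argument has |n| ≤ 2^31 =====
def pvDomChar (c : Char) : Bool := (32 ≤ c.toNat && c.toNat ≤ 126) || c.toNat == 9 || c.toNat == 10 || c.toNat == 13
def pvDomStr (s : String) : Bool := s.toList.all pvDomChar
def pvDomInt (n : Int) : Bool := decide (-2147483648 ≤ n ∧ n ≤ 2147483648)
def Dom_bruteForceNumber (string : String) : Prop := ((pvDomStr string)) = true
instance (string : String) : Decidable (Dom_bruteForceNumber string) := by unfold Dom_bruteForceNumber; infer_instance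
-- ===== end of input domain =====

-- B replaces A's incremental prefix-growing accumulation (which rebuilds every partial
-- string once per character) with a counting enumeration: the k numeric positions form a
-- base-10 counter; output j (j in range(10^k)) is the string with those positions
-- overwritten by the digits of j, built once (faster: measured).
-- c.isnumeric() is ported as PySem.Chars.isdigit, exact on the ASCII domain Dom_.


-- ===== PORT A =====
def bruteForceNumber (string : String) : List String :=
  string.toList.foldl (fun output c =>
    if PySem.Chars.isdigit c then
      output.foldl (fun tmp o =>
        (PySem.List.pyRange 0 10 1).foldl (fun tmp i => tmp ++ [o ++ PySem.Int.toStr i]) tmp) []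
    else
      output.foldl (fun tmp o => tmp ++ [o ++ String.ofList [c]]) []) [""]

-- ===== PORT B =====
def bruteForceNumber_alt (string : String) : List String :=
  let pos : List Int := (PySem.List.enumerate string.toList 0).filterMap
    (fun p => if PySem.Chars.isdigit p.2 then some p.1 else none)
  (PySem.List.pyRange 0 ((10 : Int) ^ pos.length) 1).map (fun j =>
    let st := pos.reverse.foldl
      (fun (p : List String × Int) i =>
        (p.1.set i.toNat (PySem.Int.toStr (PySem.Int.mod p.2 10)), PySem.Int.floordiv p.2 10))
      (string.toList.map (fun c => String.ofList [c]), j)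
    PySem.Str.join "" st.1)

-- ===== PRECONDITION & SPEC =====
def Spec_bruteForceNumber (string : String) (out : List String) : Prop := out = bruteForceNumber_alt string
instance (string : String) (out : List String) : Decidable (Spec_bruteForceNumber string out) := by unfold Spec_bruteForceNumber; infer_instance

-- ===== CLAIM (what is proved, stated in full; the proofs are below) =====
def Claim_equal_bruteForceNumber : Prop := ∀ (string : String), Dom_bruteForceNumber string → Spec_bruteForceNumber string (bruteForceNumber string)

-- ===== LEMMAS AND PROOFS =====

-- Common proof-side characterisation: expansions of a suffix, by structural recursion.
def bfnSuffix : List Char → List String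
  | [] => [""]
  | c :: rest =>
    (if PySem.Chars.isdigit c then (PySem.List.pyRange 0 10 1).map PySem.Int.toStr
     else [String.ofList [c]]).flatMap (fun o => (bfnSuffix rest).map (fun r => o ++ r))

-- ---- A-side: A's fold equals bfnSuffix ----

-- Loop invariant: folding A's per-character step over l from accumulator acc
-- yields every element of acc extended by every expansion of l, in order.
theorem bfn_fold_eq (l : List Char) (acc : List String) :
    l.foldl (fun output c =>
      if PySem.Chars.isdigit c then
        output.foldl (fun tmp o =>
          (PySem.List.pyRange 0 10 1).foldl (fun tmp i => tmp ++ [o ++ PySem.Int.toStr i]) tmp) []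
      else
        output.foldl (fun tmp o => tmp ++ [o ++ String.ofList [c]]) []) acc
    = acc.flatMap (fun o => (bfnSuffix l).map (fun r => o ++ r)) := by
  induction l generalizing acc with
  | nil =>
    simpa [bfnSuffix] using (List.flatMap_singleton' acc).symm
  | cons c rest ih =>
    simp only [List.foldl_cons, ih, bfnSuffix]
    by_cases h : PySem.Chars.isdigit c = true
    · simp only [h, if_true]
      have inner : ∀ (tmp : List String) (o : String),
          (PySem.List.pyRange 0 10 1).foldl (fun tmp i => tmp ++ [o ++ PySem.Int.toStr i]) tmp
          = tmp ++ (PySem.List.pyRange 0 10 1).map (fun i => o ++ PySem.Int.toStr i) :=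
        fun tmp o => PySem.List.foldl_append_singleton_eq_map ..
      simp only [inner, PySem.List.foldl_append_eq_flatMap, List.nil_append]
      simp [List.map_flatMap, List.flatMap_assoc, List.flatMap_map, List.map_map, Function.comp_def, String.append_assoc]
    · simp only [h, PySem.List.foldl_append_singleton_eq_map, List.nil_append]
      simp [List.map_flatMap, List.flatMap_assoc, List.flatMap_map, List.map_map, Function.comp_def, String.append_assoc]

theorem a_eq_bfnSuffix (s : String) : bruteForceNumber s = bfnSuffix s.toList := by
  unfold bruteForceNumber
  rw [bfn_fold_eq]
  simp [List.flatMap]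

-- ---- B-side ----

-- B's per-position loop body.
def bfnStep (p : List String × Int) (i : Int) : List String × Int :=
  (p.1.set i.toNat (PySem.Int.toStr (PySem.Int.mod p.2 10)), PySem.Int.floordiv p.2 10)

-- The digit positions B computes, and their structural unfolding.
def bfnPos (cs : List Char) : List Int :=
  (PySem.List.enumerate cs 0).filterMap (fun p => if PySem.Chars.isdigit p.2 then some p.1 else none)

theorem join_empty_cons (s : String) (l : List String) :
    PySem.Str.join "" (s :: l) = s ++ PySem.Str.join "" l := by
  cases l with
  | nil => simp [PySem.Str.join, PySem.Chars.join_singleton]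
  | cons b t =>
    simp only [PySem.Str.join, List.map_cons, PySem.Chars.join_cons_cons]
    apply String.ext
    simp

theorem enumerate_filterMap_shift (cs : List Char) (s : Int) :
    (PySem.List.enumerate cs s).filterMap (fun p => if PySem.Chars.isdigit p.2 then some p.1 else none)
    = (bfnPos cs).map (· + s) := by
  induction cs generalizing s with
  | nil => simp [bfnPos, PySem.List.enumerate_nil]
  | cons c rest ih =>
    simp only [bfnPos, PySem.List.enumerate_cons, List.filterMap_cons]
    by_cases h : PySem.Chars.isdigit c = true <;>
      simp [h, ih, List.map_map, Function.comp_def, add_comm, add_left_comm]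

theorem bfnPos_cons (c : Char) (rest : List Char) :
    bfnPos (c :: rest)
    = (if PySem.Chars.isdigit c then [0] else []) ++ (bfnPos rest).map (· + 1) := by
  simp only [bfnPos, PySem.List.enumerate_cons, List.filterMap_cons]
  by_cases h : PySem.Chars.isdigit c = true <;>
    simp [h, enumerate_filterMap_shift rest 1, bfnPos]

theorem bfnPos_nonneg (cs : List Char) : ∀ i ∈ bfnPos cs, 0 ≤ i := by
  induction cs with
  | nil => simp [bfnPos, PySem.List.enumerate_nil]
  | cons c rest ih =>
    intro i hi
    rw [bfnPos_cons] at hi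
    rcases List.mem_append.1 hi with h | h
    · by_cases hc : PySem.Chars.isdigit c = true <;> simp [hc] at h; omega
    · rcases List.mem_map.1 h with ⟨k, hk, rfl⟩
      have := ih k hk; omega

-- Positions ≥ 1 pass through a cons accumulator untouched.
theorem bfnStep_fold_shift (l : List Int) (hpos : ∀ i ∈ l, 0 ≤ i)
    (s : String) (chars : List String) (n : Int) :
    (l.map (· + 1)).foldl bfnStep (s :: chars, n)
    = (s :: (l.foldl bfnStep (chars, n)).1, (l.foldl bfnStep (chars, n)).2) := by
  induction l generalizing chars n with
  | nil => simp
  | cons i t ih =>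
    have hi : 0 ≤ i := hpos i (by simp)
    have ht : ∀ j ∈ t, 0 ≤ j := fun j hj => hpos j (by simp [hj])
    simp only [List.map_cons, List.foldl_cons]
    rw [show bfnStep (s :: chars, n) (i + 1)
        = (s :: (bfnStep (chars, n) i).1, (bfnStep (chars, n) i).2) by
      simp only [bfnStep]
      rw [show (i + 1).toNat = i.toNat + 1 by omega]
      simp]
    exact ih ht _ _

theorem floordiv_ten_nonneg (n : Int) (hn : 0 ≤ n) : 0 ≤ PySem.Int.floordiv n 10 := by
  rw [PySem.Int.floordiv_eq_ediv_of_pos (by norm_num)]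
  exact Int.ediv_nonneg hn (by norm_num)

-- The numeric accumulator after folding l is n // 10^len(l).
theorem bfnStep_fold_snd (l : List Int) (chars : List String) (n : Int) (hn : 0 ≤ n) :
    (l.foldl bfnStep (chars, n)).2 = n / 10 ^ l.length := by
  induction l generalizing chars n with
  | nil => simp
  | cons i t ih =>
    simp only [List.foldl_cons, bfnStep, List.length_cons]
    rw [ih _ _ (floordiv_ten_nonneg n hn), PySem.Int.floordiv_eq_ediv_of_pos (by norm_num)]
    rw [Int.ediv_ediv_of_nonneg (by norm_num : (0:Int) ≤ 10)]
    congr 1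
    ring
  
-- The written characters depend only on n modulo 10^len(l).
theorem bfnStep_fold_indep (l : List Int) (chars : List String) (n d : Int) (hn : 0 ≤ n) :
    (l.foldl bfnStep (chars, d * 10 ^ l.length + n)).1 = (l.foldl bfnStep (chars, n)).1 := by
  induction l generalizing chars n with
  | nil => simp
  | cons i t ih =>
    simp only [List.foldl_cons, bfnStep, List.length_cons]
    have hmod : PySem.Int.mod (d * 10 ^ (t.length + 1) + n) 10 = PySem.Int.mod n 10 := by
      rw [PySem.Int.mod_eq_emod_of_pos (by norm_num), PySem.Int.mod_eq_emod_of_pos (by norm_num)]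
      have h1 : d * 10 ^ (t.length + 1) + n = n + (d * 10 ^ t.length) * 10 := by ring
      rw [h1, Int.add_mul_emod_self_right]
    have hdiv : PySem.Int.floordiv (d * 10 ^ (t.length + 1) + n) 10
        = d * 10 ^ t.length + PySem.Int.floordiv n 10 := by
      rw [PySem.Int.floordiv_eq_ediv_of_pos (by norm_num), PySem.Int.floordiv_eq_ediv_of_pos (by norm_num)]
      have h1 : d * 10 ^ (t.length + 1) + n = n + (d * 10 ^ t.length) * 10 := by ring
      rw [h1, Int.add_mul_ediv_right _ _ (by norm_num)]
      ring
    rw [hmod, hdiv, ih _ _ (floordiv_ten_nonneg n hn)]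

-- Splitting range(a*m) into a blocks of m, in order.
theorem range_mul_flatMap (a m : Nat) :
    List.range (a * m) = (List.range a).flatMap (fun d => (List.range m).map (d * m + ·)) := by
  induction a with
  | zero => simp
  | succ a ih =>
    rw [Nat.succ_mul, List.range_add, List.range_succ, ih]
    simp

-- B's mapped body, as a named function of the suffix.
def bfnFill (cs : List Char) (j : Int) : String :=
  PySem.Str.join ""
    (((bfnPos cs).reverse.foldl bfnStep (cs.map (fun c => String.ofList [c]), j)).1)

theorem alt_eq_map_fill (s : String) :
    bruteForceNumber_alt s
    = (PySem.List.pyRange 0 ((10 : Int) ^ (bfnPos s.toList).length) 1).map (bfnFill s.toList) := by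
  unfold bruteForceNumber_alt bfnFill bfnPos bfnStep
  rfl

theorem int_pow_ten_toNat (k : Nat) : ((10 : Int) ^ k).toNat = 10 ^ k := by
  rw [show (10 : Int) ^ k = ((10 ^ k : Nat) : Int) by push_cast; ring, Int.toNat_natCast]

-- One step of B's fill, peeled off the front of the string.
theorem bfnFill_cons (c : Char) (rest : List Char) (j : Int) :
    bfnFill (c :: rest) j
    = if PySem.Chars.isdigit c then
        PySem.Int.toStr (PySem.Int.mod
            (((bfnPos rest).reverse.foldl bfnStep
              (rest.map (fun c => String.ofList [c]), j)).2) 10)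
          ++ bfnFill rest j
      else String.ofList [c] ++ bfnFill rest j := by
  have hrevpos : ∀ i ∈ (bfnPos rest).reverse, 0 ≤ i := by
    intro i hi; exact bfnPos_nonneg rest i (List.mem_reverse.1 hi)
  by_cases h : PySem.Chars.isdigit c = true
  · simp only [bfnFill, bfnPos_cons, h, if_true, List.singleton_append, List.reverse_cons,
      List.map_cons]
    rw [List.foldl_append, ← List.map_reverse, bfnStep_fold_shift _ hrevpos]
    simp only [List.foldl_cons, List.foldl_nil, bfnStep, Int.toNat_zero, List.set_cons_zero]
    rw [join_empty_cons]
  · simp only [bfnFill, bfnPos_cons, h, if_false, Bool.false_eq_true, List.nil_append,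
      List.map_cons]
    rw [← List.map_reverse, bfnStep_fold_shift _ hrevpos]
    rw [join_empty_cons]

-- Main B-side lemma: counting enumeration produces exactly the suffix expansions.
theorem fill_map_eq_bfnSuffix (cs : List Char) :
    (PySem.List.pyRange 0 ((10 : Int) ^ (bfnPos cs).length) 1).map (bfnFill cs) = bfnSuffix cs := by
  induction cs with
  | nil =>
    simp [bfnPos, PySem.List.enumerate_nil, bfnFill, bfnSuffix, PySem.List.pyRange_one,
      List.range_succ, PySem.Str.join]
  | cons c rest ih =>
    have ih' : (List.range (10 ^ (bfnPos rest).length)).map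
        (fun r : Nat => bfnFill rest (r : Int)) = bfnSuffix rest := by
      rw [← ih, PySem.List.pyRange_one, Int.sub_zero, int_pow_ten_toNat, List.map_map]
      simp [Function.comp_def]
    by_cases h : PySem.Chars.isdigit c = true
    · -- digit: split range(10^(k+1)) into 10 blocks of 10^k
      have hK : (bfnPos (c :: rest)).length = (bfnPos rest).length + 1 := by
        rw [bfnPos_cons]; simp [h]
      rw [hK, PySem.List.pyRange_one, Int.sub_zero, int_pow_ten_toNat, List.map_map]
      rw [show (10 : Nat) ^ ((bfnPos rest).length + 1) = 10 * 10 ^ (bfnPos rest).length by ring]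
      rw [range_mul_flatMap, List.map_flatMap]
      rw [show bfnSuffix (c :: rest)
          = ((PySem.List.pyRange 0 10 1).map PySem.Int.toStr).flatMap
              (fun o => (bfnSuffix rest).map (fun r => o ++ r)) by simp [bfnSuffix, h]]
      rw [PySem.List.pyRange_one, Int.sub_zero, show Int.toNat 10 = 10 by decide,
        List.map_map, List.flatMap_map]
      apply List.flatMap_congr
      intro d hd
      have hdlt : d < 10 := List.mem_range.1 hd
      rw [List.map_map]
      rw [← ih', List.map_map]
      apply List.map_congr_left
      intro r hr
      have hrlt : r < 10 ^ (bfnPos rest).length := List.mem_range.1 hr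
      simp only [Function.comp_def, zero_add]
      rw [bfnFill_cons, if_pos h]
      have hcast : ((d * 10 ^ (bfnPos rest).length + r : Nat) : Int)
          = (d : Int) * 10 ^ (bfnPos rest).length + (r : Int) := by push_cast; ring
      have hsnd : (((bfnPos rest).reverse.foldl bfnStep
          (rest.map (fun c => String.ofList [c]),
            ((d * 10 ^ (bfnPos rest).length + r : Nat) : Int))).2) = (d : Int) := by
        rw [bfnStep_fold_snd _ _ _ (by positivity), List.length_reverse]
        rw [hcast, show ((d : Int) * 10 ^ (bfnPos rest).length + (r : Int))
            = (r : Int) + (d : Int) * 10 ^ (bfnPos rest).length by ring]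
        rw [Int.add_mul_ediv_right _ _ (by positivity)]
        rw [Int.ediv_eq_zero_of_lt (by positivity) (by exact_mod_cast hrlt)]
        ring
      rw [hsnd]
      have hmodd : PySem.Int.mod (d : Int) 10 = (d : Int) := by
        rw [PySem.Int.mod_eq_emod_of_pos (by norm_num)]
        exact Int.emod_eq_of_lt (by positivity) (by exact_mod_cast hdlt)
      rw [hmodd]
      congr 1
      unfold bfnFill
      rw [show ((d * 10 ^ (bfnPos rest).length + r : Nat) : Int)
          = (d : Int) * 10 ^ ((bfnPos rest).reverse.length) + (r : Int) by
        rw [List.length_reverse]; exact hcast]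
      rw [bfnStep_fold_indep _ _ _ _ (by positivity)]
    · -- non-digit: the char is copied in front of every expansion of the rest
      have hK : (bfnPos (c :: rest)).length = (bfnPos rest).length := by
        rw [bfnPos_cons]; simp [h]
      rw [hK, PySem.List.pyRange_one, Int.sub_zero, int_pow_ten_toNat, List.map_map]
      rw [show bfnSuffix (c :: rest)
          = (bfnSuffix rest).map (fun r => String.ofList [c] ++ r) by simp [bfnSuffix, h]]
      rw [← ih', List.map_map]
      apply List.map_congr_left
      intro r _
      simp only [Function.comp_def, zero_add]
      rw [bfnFill_cons, if_neg h]

-- ===== VERDICT (by name: the statement is the Claim_ definition above) =====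
theorem bruteForceNumber_spec : Claim_equal_bruteForceNumber := by
  intro s _
  show bruteForceNumber s = bruteForceNumber_alt s
  rw [a_eq_bfnSuffix, alt_eq_map_fill, fill_map_eq_bfnSuffix]
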